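-- pv_equiv track=rewrite | github.com/haixiangyan/leetcode-python | Snapchat/1/958. Palindrome Data Stream.py | getStream
-- ===== SOURCE A (Python) =====
-- def getStream(s):
--     results = []
--     alphabet = [0 for _ in range(26)]
--     count = 0
--
--     for char in s:
--         alphabet[ord(char) - ord('a')] += 1
--
--         # 奇数
--         if alphabet[ord(char) - ord('a')] & 1:
--             count += 1
--         # 偶数
--         else:
--             count -= 1
--
--         results.append(0 if count > 1 else 1)
--
--     return results
-- ===== SOURCE B (Python) =====
-- def getStream(s):
--     results = []
--     mask = 0
--     for char in s:
--         mask ^= 1 << (ord(char) - ord('a'))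
--         results.append(1 if mask & (mask - 1) == 0 else 0)
--     return results
-- ===== Notes on version B (the rewrite author's own statement) =====
-- stated objective: idiomatic
-- what changed: Replaces the 26-element count array plus running odd-counter with a single parity bitmask toggled per character and a power-of-two test on the mask for at most one odd-count letter.
-- outside the precondition, e.g. on getStream('G'): A returns [1], B raises ValueError; on getStream('`ab'): A returns [1, 0, 0], B raises ValueError; on getStream('{'): A raises IndexError, B returns [1]
import Mathlib
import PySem

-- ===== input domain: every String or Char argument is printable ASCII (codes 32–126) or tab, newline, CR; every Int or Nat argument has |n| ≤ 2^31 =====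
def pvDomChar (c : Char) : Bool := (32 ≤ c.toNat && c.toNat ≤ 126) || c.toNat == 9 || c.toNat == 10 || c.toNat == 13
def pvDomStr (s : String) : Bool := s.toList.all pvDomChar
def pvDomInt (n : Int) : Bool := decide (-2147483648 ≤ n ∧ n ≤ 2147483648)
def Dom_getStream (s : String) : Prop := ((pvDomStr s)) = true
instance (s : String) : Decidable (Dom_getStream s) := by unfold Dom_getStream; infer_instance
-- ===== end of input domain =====

-- B replaces A's 26-slot count array and running odd-counter by a single parity bitmask
-- with the power-of-two test on the mask (at most one letter has odd count): idiomatic, O(1) state.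

-- ===== PORT A =====
-- loop state: results so far, the 26-slot count array, the running odd-count
def getStreamLoopA : List Char → List Int → List Int → Int → List Int
  | [], results, _, _ => results
  | c :: rest, results, alphabet, count =>
    let i : Int := (c.toNat : Int) - 97
    let alphabet' := PySem.List.pySetD alphabet i (PySem.List.pyGetD alphabet i 0 + 1)
    let count' := if PySem.Int.band (PySem.List.pyGetD alphabet' i 0) 1 ≠ 0
                  then count + 1 else count - 1
    getStreamLoopA rest (results ++ [if count' > 1 then 0 else 1]) alphabet' count'

def getStream (s : String) : List Int :=
  getStreamLoopA s.toList [] (List.replicate 26 0) 0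

-- ===== PORT B =====
-- loop state: results so far, the parity bitmask
def getStreamLoopB : List Char → List Int → Int → List Int
  | [], results, _ => results
  | c :: rest, results, mask =>
    let mask' := PySem.Int.bxor mask ((1 : Int) <<< ((c.toNat : Int) - 97).toNat)
    getStreamLoopB rest
      (results ++ [if PySem.Int.band mask' (mask' - 1) = 0 then 1 else 0]) mask'

def getStream_alt (s : String) : List Int :=
  getStreamLoopB s.toList [] 0

-- ===== PRECONDITION & SPEC =====
-- Pre_ excludes strings with a character outside the lowercase letters (codes 97-122): on codes
-- 123-126 A raises IndexError, and on codes 71-96 A returns a value only through Python's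
-- negative-index wraparound (reading those codes as shifted lowercase letters), where B's natural
-- bit shift raises ValueError on the negative shift count.
def Pre_getStream (s : String) : Prop :=
  (s.toList.all fun c => 97 ≤ c.toNat && c.toNat ≤ 122) = true
instance (s : String) : Decidable (Pre_getStream s) := by unfold Pre_getStream; infer_instance
def pvWitness_getStream : String := "abcba"

def Spec_getStream (s : String) (out : List Int) : Prop := out = getStream_alt s
instance (s : String) (out : List Int) : Decidable (Spec_getStream s out) := by unfold Spec_getStream; infer_instance

-- ===== CLAIM (what is proved, stated in full; the proofs are below) =====
def Claim_equal_getStream : Prop := ∀ (s : String), Dom_getStream s → Pre_getStream s → Spec_getStream s (getStream s)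

-- ===== LEMMAS AND PROOFS =====

-- the set of letters with odd count, read off the mask
def oddSet (m : Nat) : Finset ℕ := (Finset.range 26).filter (fun j => m.testBit j)

lemma mem_oddSet {m j : Nat} (hj : j < 26) : j ∈ oddSet m ↔ m.testBit j = true := by
  simp [oddSet, hj]

lemma testBit_of_pow_bounds {x b : Nat} (h1 : 2^b ≤ x) (h2 : x < 2^(b+1)) :
    x.testBit b = true := by
  rw [Nat.testBit, Nat.shiftRight_eq_div_pow]
  have hb : 0 < 2^b := Nat.two_pow_pos b
  have h1' : 1 ≤ x / 2^b := (Nat.one_le_div_iff hb).2 h1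
  have h2' : x / 2^b < 2 := (Nat.div_lt_iff_lt_mul hb).2 (by rw [pow_succ] at h2; omega)
  have hx : x / 2^b = 1 := by omega
  simp [hx]

-- getD after set, in the form the loop proof uses
lemma getD_set_eq (xs : List Int) (j j' : Nat) (v : Int) (h : j < xs.length) :
    (xs.set j v).getD j' 0 = if j' = j then v else xs.getD j' 0 := by
  rw [List.getD_eq_getElem?_getD, List.getD_eq_getElem?_getD, List.getElem?_set]
  split_ifs with h1 h2
  · subst h2; simp
  · omega
  · omega
  · rfl

-- the power-of-two test reads "at most one odd letter"
lemma key_and_pred (m : Nat) (hm : ∀ j, m.testBit j = true → j < 26) :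
    (m &&& (m - 1) = 0) ↔ (oddSet m).card ≤ 1 := by
  have hcases : (oddSet m).card ≤ 1 → m &&& (m - 1) = 0 := by
    intro hle
    rcases Nat.le_one_iff_eq_zero_or_eq_one.mp hle with h0 | h1
    · have hS : oddSet m = ∅ := Finset.card_eq_zero.mp h0
      have hm0 : m = 0 := by
        apply Nat.zero_of_testBit_eq_false
        intro i
        by_contra hbit
        have hi : m.testBit i = true := by simpa using hbit
        have : i ∈ oddSet m := (mem_oddSet (hm i hi)).mpr hi
        simp [hS] at this
      simp [hm0]
    · obtain ⟨k, hk⟩ := Finset.card_eq_one.mp h1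
      have hmk : m = 2^k := by
        apply Nat.eq_of_testBit_eq
        intro j
        rw [Nat.testBit_two_pow]
        rcases eq_or_ne j k with rfl | hne
        · have : j ∈ oddSet m := by simp [hk]
          simp [oddSet, Finset.mem_filter] at this
          simp [this]
        · have hfalse : m.testBit j = false := by
            by_contra h'
            have hj : m.testBit j = true := by simpa using h'
            have : j ∈ oddSet m := (mem_oddSet (hm j hj)).mpr hj
            rw [hk] at this
            simp at this
            exact hne this
          simp [hfalse, Ne.symm hne]
      subst hmk
      apply Nat.zero_of_testBit_eq_false
      intro i
      rw [Nat.testBit_and]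
      rcases eq_or_ne i k with rfl | hne
      · have : (2^i - 1).testBit i = false :=
          Nat.testBit_eq_false_of_lt (by have := Nat.two_pow_pos i; omega)
        simp [this]
      · have : (2^k : Nat).testBit i = false := by
          rw [Nat.testBit_two_pow]
          simp [Ne.symm hne]
        simp [this]
  have h2 : 2 ≤ (oddSet m).card → m &&& (m - 1) ≠ 0 := by
    intro hge h0
    have hne : (oddSet m).Nonempty := Finset.card_pos.mp (by omega)
    set b := (oddSet m).max' hne with hbdef
    obtain ⟨a, hamem, hab⟩ := Finset.exists_mem_ne (by omega : 1 < (oddSet m).card) b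
    have hbbit : m.testBit b = true := (Finset.mem_filter.mp ((oddSet m).max'_mem hne)).2
    have habit : m.testBit a = true := (Finset.mem_filter.mp hamem).2
    have high : ∀ k, b < k → m.testBit k = false := by
      intro k hk
      by_contra h'
      have hkt : m.testBit k = true := by simpa using h'
      have : k ∈ oddSet m := (mem_oddSet (hm k hkt)).mpr hkt
      have := (oddSet m).le_max' k this
      omega
    have hlt : m < 2^(b+1) := Nat.lt_pow_two_of_testBit m high
    have hge2 : 2^b ≤ m := Nat.ge_two_pow_of_testBit hbbit
    have hneq : m ≠ 2^b := by
      intro he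
      rw [he, Nat.testBit_two_pow] at habit
      have : a ≤ b := (oddSet m).le_max' a hamem
      simp at habit
      omega
    have hpos := Nat.two_pow_pos b
    have tb1 : (m - 1).testBit b = true := testBit_of_pow_bounds (by omega) (by omega)
    have hand : (m &&& (m - 1)).testBit b = true := by
      rw [Nat.testBit_and, hbbit, tb1]
      rfl
    rw [h0] at hand
    simp at hand
  constructor
  · intro h
    by_contra hc
    exact h2 (by omega) h
  · exact hcases

-- the Int-level form of the power-of-two test, as port B computes it
lemma band_pred_iff (m : Nat) (hm : ∀ j, m.testBit j = true → j < 26) :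
    (PySem.Int.band (m : Int) ((m : Int) - 1) = 0) ↔ (oddSet m).card ≤ 1 := by
  rcases Nat.eq_zero_or_pos m with h0 | hpos
  · have hSempty : oddSet m = ∅ := by
      apply Finset.eq_empty_of_forall_notMem
      intro x hx
      have := (Finset.mem_filter.mp hx).2
      rw [h0] at this
      simp at this
    rw [hSempty, h0]
    simp
  · have hc1 : ((m : Int) - 1) = ((m - 1 : Nat) : Int) := by omega
    rw [hc1, PySem.Int.band_natCast]
    rw [show ((((m &&& (m - 1)) : Nat) : Int) = 0 ↔ m &&& (m - 1) = 0) from by omega]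
    exact key_and_pred m hm

-- how one toggle moves the odd set
lemma oddSet_xor (mask j : Nat) (hj : j < 26) :
    oddSet (mask ^^^ 2^j) =
      if mask.testBit j then (oddSet mask).erase j else insert j (oddSet mask) := by
  ext j'
  by_cases hje : j' = j
  · subst hje
    by_cases htb : mask.testBit j'
    · simp [htb, mem_oddSet hj, Nat.testBit_xor]
    · simp [htb, mem_oddSet hj, Nat.testBit_xor]
  · have h2 : (2^j : Nat).testBit j' = false := by
      rw [Nat.testBit_two_pow]
      simp [Ne.symm hje]
    by_cases hj' : j' < 26
    · by_cases htb : mask.testBit j <;>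
        simp [htb, mem_oddSet hj', Nat.testBit_xor, h2, hje]
    · have hnot : ∀ m' : Nat, j' ∉ oddSet m' := by
        intro m' hmem
        exact hj' (Finset.mem_range.mp (Finset.mem_filter.mp hmem).1)
      by_cases htb : mask.testBit j <;>
        simp [htb, hnot, hje, Finset.mem_erase, Finset.mem_insert]

-- the mask never has bits beyond 25 under the loop invariant
lemma testBit_lt26 {mask : Nat} {alphabet : List Int}
    (hlen : alphabet.length = 26)
    (hbit : ∀ j, mask.testBit j = decide (alphabet.getD j 0 % 2 = 1)) :
    ∀ j, mask.testBit j = true → j < 26 := by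
  intro j hj
  by_contra h26
  have hz : alphabet.getD j 0 = 0 := by
    rw [List.getD_eq_getElem?_getD]
    have : alphabet.length ≤ j := by omega
    simp [List.getElem?_eq_none this]
  rw [hbit j, hz] at hj
  simp at hj

-- the main loop invariant: A's (array, counter) state and B's mask produce the same stream
lemma loop_eq (l : List Char) (hl : ∀ c ∈ l, 97 ≤ c.toNat ∧ c.toNat ≤ 122)
    (results alphabet : List Int) (count : Int) (mask : Nat)
    (hlen : alphabet.length = 26)
    (hbit : ∀ j, mask.testBit j = decide (alphabet.getD j 0 % 2 = 1))
    (hcount : count = ((oddSet mask).card : Int)) :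
    getStreamLoopA l results alphabet count = getStreamLoopB l results (mask : Int) := by
  induction l generalizing results alphabet count mask with
  | nil => simp [getStreamLoopA, getStreamLoopB]
  | cons c rest ih =>
    obtain ⟨hc1, hc2⟩ := hl c (List.mem_cons_self ..)
    set j : ℕ := c.toNat - 97 with hjdef
    have hcast : ((c.toNat : Int) - 97) = (j : Int) := by omega
    have hjlt : j < 26 := by omega
    have hjlen : j < alphabet.length := by omega
    set old := alphabet.getD j 0 with holddef
    set mask' := mask ^^^ 2^j with hmaskdef
    -- reduce both steps
    rw [getStreamLoopA, getStreamLoopB]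
    simp only [hcast, Int.toNat_natCast, PySem.List.pyGetD_natCast, PySem.List.pySetD_natCast]
    have hshift : (1 : Int) <<< j = ((2^j : Nat) : Int) := by
      simp [Int.shiftLeft_eq]
    rw [hshift, PySem.Int.bxor_natCast]
    have hget : (alphabet.set j (old + 1)).getD j 0 = old + 1 := by
      rw [getD_set_eq _ _ _ _ hjlen]
      simp
    rw [← holddef]
    rw [hget]
    -- A's branch condition is "old is even", i.e. mask bit j is clear
    have hband : (PySem.Int.band (old + 1) 1 ≠ 0) ↔ old % 2 = 0 := by
      rw [PySem.Int.band_one, PySem.Int.mod_eq_emod_of_pos (by norm_num)]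
      omega
    have hbitj : mask.testBit j = decide (old % 2 = 1) := by rw [holddef]; exact hbit j
    -- new invariants
    have hlen' : (alphabet.set j (old + 1)).length = 26 := by simp [hlen]
    have hbit' : ∀ j', mask'.testBit j' =
        decide ((alphabet.set j (old + 1)).getD j' 0 % 2 = 1) := by
      intro j'
      rw [hmaskdef, Nat.testBit_xor, getD_set_eq _ _ _ _ hjlen]
      rcases eq_or_ne j' j with rfl | hne
      · rw [hbit j]
        have h2 : (2^j : Nat).testBit j = true := by simp
        rw [h2, ← holddef]
        by_cases hpar : old % 2 = 1
        · have : ¬ ((old + 1) % 2 = 1) := by omega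
          simp [hpar, this]
        · have : (old + 1) % 2 = 1 := by omega
          simp [hpar, this]
      · have h2 : (2^j : Nat).testBit j' = false := by
          rw [Nat.testBit_two_pow]
          simp [Ne.symm hne]
        rw [h2, hbit j']
        simp [hne]
    have hS := oddSet_xor mask j hjlt
    -- cases on the parity of the old count
    by_cases hpar : old % 2 = 0
    · -- count goes up, the bit turns on
      have hAcond : PySem.Int.band (old + 1) 1 ≠ 0 := hband.mpr hpar
      have htb : mask.testBit j = false := by
        rw [hbitj]
        simp
        omega
      have hnotmem : j ∉ oddSet mask := by
        rw [mem_oddSet hjlt, htb]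
        simp
      have hcard' : ((oddSet mask').card : Int) = count + 1 := by
        rw [hS, htb]
        simp only [if_neg Bool.false_ne_true]
        rw [Finset.card_insert_of_notMem hnotmem, hcount]
        push_cast
        ring
      have hcount' : count + 1 = ((oddSet mask').card : Int) := hcard'.symm
      simp only [if_pos hAcond]
      -- the emitted bits agree
      have hemit : (if count + 1 > 1 then (0:Int) else 1) =
          (if PySem.Int.band (mask' : Int) ((mask' : Int) - 1) = 0 then (1:Int) else 0) := by
        have hiff := band_pred_iff mask' (testBit_lt26 hlen' hbit')
        rw [hcount'] 
        by_cases hle : (oddSet mask').card ≤ 1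
        · rw [if_pos (hiff.mpr hle), if_neg (by omega)]
        · rw [if_neg (fun h => hle (hiff.mp h)), if_pos (by omega)]
      rw [hemit]
      exact ih (fun c hc => hl c (List.mem_cons_of_mem _ hc)) _ _ _ _ hlen' hbit' hcard'.symm
    · -- count goes down, the bit turns off
      have hAcond : ¬ (PySem.Int.band (old + 1) 1 ≠ 0) := fun h => hpar (hband.mp h)
      have htb : mask.testBit j = true := by
        rw [hbitj]
        simp
        omega
      have hmem : j ∈ oddSet mask := (mem_oddSet hjlt).mpr htb
      have hpos : 1 ≤ (oddSet mask).card := Finset.card_pos.mpr ⟨j, hmem⟩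
      have hcard' : ((oddSet mask').card : Int) = count - 1 := by
        rw [hS, if_pos htb, Finset.card_erase_of_mem hmem, hcount]
        omega
      simp only [if_neg hAcond]
      have hemit : (if count - 1 > 1 then (0:Int) else 1) =
          (if PySem.Int.band (mask' : Int) ((mask' : Int) - 1) = 0 then (1:Int) else 0) := by
        have hiff := band_pred_iff mask' (testBit_lt26 hlen' hbit')
        rw [show count - 1 = ((oddSet mask').card : Int) from hcard'.symm]
        by_cases hle : (oddSet mask').card ≤ 1
        · rw [if_pos (hiff.mpr hle), if_neg (by omega)]
        · rw [if_neg (fun h => hle (hiff.mp h)), if_pos (by omega)]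
      rw [hemit]
      exact ih (fun c hc => hl c (List.mem_cons_of_mem _ hc)) _ _ _ _ hlen' hbit' hcard'.symm

-- ===== VERDICT (by name: the statement is the Claim_ definition above) =====
theorem getStream_spec : Claim_equal_getStream := by
  intro s _ hpre
  unfold Spec_getStream getStream getStream_alt
  have hl : ∀ c ∈ s.toList, 97 ≤ c.toNat ∧ c.toNat ≤ 122 := by
    intro c hc
    rw [Pre_getStream, List.all_eq_true] at hpre
    have := hpre c hc
    simp at this
    omega
  have hb : ∀ j : ℕ, (0 : Nat).testBit j = decide ((List.replicate 26 (0:Int)).getD j 0 % 2 = 1) := by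
    intro j
    have hz : (List.replicate 26 (0:Int)).getD j 0 = 0 := by
      rw [List.getD_eq_getElem?_getD, List.getElem?_replicate]
      split <;> rfl
    rw [Nat.zero_testBit, hz]
    rfl
  have h := loop_eq s.toList hl [] (List.replicate 26 0) 0 0 (by simp) hb (by simp [oddSet])
  simpa using h
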